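-- pv_equiv track=rewrite | github.com/b9b4ymiN/p2_mlFeature | schemas.py | _dtype_matches
-- ===== SOURCE A (Python) =====
-- def _dtype_matches(actual: str, expected: str) -> bool:
--     """Check if dtypes match (with some flexibility)"""
--     # Normalize dtype strings
--     dtype_mapping = {
--         'int64': ['int64', 'int32', 'int'],
--         'float64': ['float64', 'float32', 'float'],
--         'datetime64[ns]': ['datetime64', 'datetime64[ns]', 'datetime64[ns, UTC]'],
--         'object': ['object', 'string']
--     }
--
--     for expected_group, actual_group in dtype_mapping.items():
--         if expected in actual_group and actual in actual_group:
--             return True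
--
--     return actual == expected
-- ===== SOURCE B (Python) =====
-- _DTYPE_GROUPS = {
--     'int64': ['int64', 'int32', 'int'],
--     'float64': ['float64', 'float32', 'float'],
--     'datetime64[ns]': ['datetime64', 'datetime64[ns]', 'datetime64[ns, UTC]'],
--     'object': ['object', 'string'],
-- }
--
-- # Reverse lookup: dtype string -> its group key, built once.
-- _GROUP_OF = {d: g for g, ds in _DTYPE_GROUPS.items() for d in ds}
--
--
-- def _dtype_matches(actual: str, expected: str) -> bool:
--     """Check if dtypes match (with some flexibility)"""
--     g = _GROUP_OF.get(expected)
--     if g is not None: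
--         return g == _GROUP_OF.get(actual)
--     return actual == expected
-- ===== Notes on version B (the rewrite author's own statement) =====
-- stated objective: idiomatic
-- what changed: Replaces the scan over all dtype groups (two membership tests per group) with a reverse lookup dict mapping each dtype string to its group key, built once; matching becomes two constant-time lookups plus the equality fallback for unknown dtypes.
import Mathlib
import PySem

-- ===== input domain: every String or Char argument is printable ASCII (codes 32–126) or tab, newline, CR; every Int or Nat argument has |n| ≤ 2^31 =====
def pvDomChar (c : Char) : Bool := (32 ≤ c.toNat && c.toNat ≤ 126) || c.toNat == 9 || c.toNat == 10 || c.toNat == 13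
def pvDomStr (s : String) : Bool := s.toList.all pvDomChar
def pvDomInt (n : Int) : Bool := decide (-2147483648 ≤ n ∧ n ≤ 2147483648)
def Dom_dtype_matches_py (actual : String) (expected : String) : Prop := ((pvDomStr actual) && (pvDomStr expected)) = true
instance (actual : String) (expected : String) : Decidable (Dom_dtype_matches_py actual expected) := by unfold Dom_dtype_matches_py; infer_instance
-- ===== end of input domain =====

-- B replaces A's scan over all dtype groups with a reverse lookup table (dtype -> group key) built once: two lookups plus the equality fallback (objective: idiomatic).
-- ===== PORT A =====
-- dict of A, in insertion order
def pvMappingA : List (String × List String) :=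
  [("int64", ["int64", "int32", "int"]),
   ("float64", ["float64", "float32", "float"]),
   ("datetime64[ns]", ["datetime64", "datetime64[ns]", "datetime64[ns, UTC]"]),
   ("object", ["object", "string"])]

-- the for-loop over dtype_mapping.items(): first group containing both wins, else fallback
def pvLoopA (actual : String) (expected : String) : List (String × List String) → Bool
  | [] => actual == expected
  | (_, grp) :: rest =>
      if grp.contains expected && grp.contains actual then true
      else pvLoopA actual expected rest

def dtype_matches_py (actual : String) (expected : String) : Bool :=
  pvLoopA actual expected pvMappingA

-- ===== PORT B =====
-- the reverse-lookup dict of Source B (dtype string -> group key), as an association list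
def pvGroupOf : List (String × String) :=
  [("int64", "int64"), ("int32", "int64"), ("int", "int64"),
   ("float64", "float64"), ("float32", "float64"), ("float", "float64"),
   ("datetime64", "datetime64[ns]"), ("datetime64[ns]", "datetime64[ns]"), ("datetime64[ns, UTC]", "datetime64[ns]"),
   ("object", "object"), ("string", "object")]

-- dict .get(k): first match in the association list, None if absent
def pvGet : List (String × String) → String → Option String
  | [], _ => none
  | (k, v) :: rest, x => if k == x then some v else pvGet rest x

def dtype_matches_py_alt (actual : String) (expected : String) : Bool :=
  match pvGet pvGroupOf expected with
  | some g => some g == pvGet pvGroupOf actual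
  | none => actual == expected

-- ===== PRECONDITION & SPEC =====
def Spec_dtype_matches_py (actual : String) (expected : String) (out : Bool) : Prop := out = dtype_matches_py_alt actual expected
instance (actual : String) (expected : String) (out : Bool) : Decidable (Spec_dtype_matches_py actual expected out) := by unfold Spec_dtype_matches_py; infer_instance

-- ===== CLAIM (what is proved, stated in full; the proofs are below) =====
def Claim_equal_dtype_matches_py : Prop := ∀ (actual : String) (expected : String), Dom_dtype_matches_py actual expected → Spec_dtype_matches_py actual expected (dtype_matches_py actual expected)

-- ===== LEMMAS AND PROOFS =====

-- ===== VERDICT (by name: the statement is the Claim_ definition above) =====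
theorem dtype_matches_py_spec : Claim_equal_dtype_matches_py := by
  intro actual expected hdom
  clear hdom
  unfold Spec_dtype_matches_py
  by_cases e0 : expected = "int64"
  · subst e0
    by_cases a0 : actual = "int64"
    · subst a0; decide
    by_cases a1 : actual = "int32"
    · subst a1; decide
    by_cases a2 : actual = "int"
    · subst a2; decide
    by_cases a3 : actual = "float64"
    · subst a3; decide
    by_cases a4 : actual = "float32"
    · subst a4; decide
    by_cases a5 : actual = "float"
    · subst a5; decide
    by_cases a6 : actual = "datetime64"
    · subst a6; decide
    by_cases a7 : actual = "datetime64[ns]"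
    · subst a7; decide
    by_cases a8 : actual = "datetime64[ns, UTC]"
    · subst a8; decide
    by_cases a9 : actual = "object"
    · subst a9; decide
    by_cases a10 : actual = "string"
    · subst a10; decide
    simp only [dtype_matches_py, dtype_matches_py_alt, pvLoopA, pvMappingA, pvGet, pvGroupOf, List.contains_eq_mem, List.mem_cons, List.not_mem_nil]
    simp [beq_iff_eq, a0, Ne.symm a0, a1, Ne.symm a1, a2, Ne.symm a2, a3, Ne.symm a3, a4, Ne.symm a4, a5, Ne.symm a5, a6, Ne.symm a6, a7, Ne.symm a7, a8, Ne.symm a8, a9, Ne.symm a9, a10, Ne.symm a10]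
  by_cases e1 : expected = "int32"
  · subst e1
    by_cases a0 : actual = "int64"
    · subst a0; decide
    by_cases a1 : actual = "int32"
    · subst a1; decide
    by_cases a2 : actual = "int"
    · subst a2; decide
    by_cases a3 : actual = "float64"
    · subst a3; decide
    by_cases a4 : actual = "float32"
    · subst a4; decide
    by_cases a5 : actual = "float"
    · subst a5; decide
    by_cases a6 : actual = "datetime64"
    · subst a6; decide
    by_cases a7 : actual = "datetime64[ns]"
    · subst a7; decide
    by_cases a8 : actual = "datetime64[ns, UTC]"
    · subst a8; decide
    by_cases a9 : actual = "object"
    · subst a9; decide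
    by_cases a10 : actual = "string"
    · subst a10; decide
    simp only [dtype_matches_py, dtype_matches_py_alt, pvLoopA, pvMappingA, pvGet, pvGroupOf, List.contains_eq_mem, List.mem_cons, List.not_mem_nil]
    simp [beq_iff_eq, a0, Ne.symm a0, a1, Ne.symm a1, a2, Ne.symm a2, a3, Ne.symm a3, a4, Ne.symm a4, a5, Ne.symm a5, a6, Ne.symm a6, a7, Ne.symm a7, a8, Ne.symm a8, a9, Ne.symm a9, a10, Ne.symm a10]
  by_cases e2 : expected = "int"
  · subst e2
    by_cases a0 : actual = "int64"
    · subst a0; decide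
    by_cases a1 : actual = "int32"
    · subst a1; decide
    by_cases a2 : actual = "int"
    · subst a2; decide
    by_cases a3 : actual = "float64"
    · subst a3; decide
    by_cases a4 : actual = "float32"
    · subst a4; decide
    by_cases a5 : actual = "float"
    · subst a5; decide
    by_cases a6 : actual = "datetime64"
    · subst a6; decide
    by_cases a7 : actual = "datetime64[ns]"
    · subst a7; decide
    by_cases a8 : actual = "datetime64[ns, UTC]"
    · subst a8; decide
    by_cases a9 : actual = "object"
    · subst a9; decide
    by_cases a10 : actual = "string"
    · subst a10; decide
    simp only [dtype_matches_py, dtype_matches_py_alt, pvLoopA, pvMappingA, pvGet, pvGroupOf, List.contains_eq_mem, List.mem_cons, List.not_mem_nil]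
    simp [beq_iff_eq, a0, Ne.symm a0, a1, Ne.symm a1, a2, Ne.symm a2, a3, Ne.symm a3, a4, Ne.symm a4, a5, Ne.symm a5, a6, Ne.symm a6, a7, Ne.symm a7, a8, Ne.symm a8, a9, Ne.symm a9, a10, Ne.symm a10]
  by_cases e3 : expected = "float64"
  · subst e3
    by_cases a0 : actual = "int64"
    · subst a0; decide
    by_cases a1 : actual = "int32"
    · subst a1; decide
    by_cases a2 : actual = "int"
    · subst a2; decide
    by_cases a3 : actual = "float64"
    · subst a3; decide
    by_cases a4 : actual = "float32"
    · subst a4; decide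
    by_cases a5 : actual = "float"
    · subst a5; decide
    by_cases a6 : actual = "datetime64"
    · subst a6; decide
    by_cases a7 : actual = "datetime64[ns]"
    · subst a7; decide
    by_cases a8 : actual = "datetime64[ns, UTC]"
    · subst a8; decide
    by_cases a9 : actual = "object"
    · subst a9; decide
    by_cases a10 : actual = "string"
    · subst a10; decide
    simp only [dtype_matches_py, dtype_matches_py_alt, pvLoopA, pvMappingA, pvGet, pvGroupOf, List.contains_eq_mem, List.mem_cons, List.not_mem_nil]
    simp [beq_iff_eq, a0, Ne.symm a0, a1, Ne.symm a1, a2, Ne.symm a2, a3, Ne.symm a3, a4, Ne.symm a4, a5, Ne.symm a5, a6, Ne.symm a6, a7, Ne.symm a7, a8, Ne.symm a8, a9, Ne.symm a9, a10, Ne.symm a10]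
  by_cases e4 : expected = "float32"
  · subst e4
    by_cases a0 : actual = "int64"
    · subst a0; decide
    by_cases a1 : actual = "int32"
    · subst a1; decide
    by_cases a2 : actual = "int"
    · subst a2; decide
    by_cases a3 : actual = "float64"
    · subst a3; decide
    by_cases a4 : actual = "float32"
    · subst a4; decide
    by_cases a5 : actual = "float"
    · subst a5; decide
    by_cases a6 : actual = "datetime64"
    · subst a6; decide
    by_cases a7 : actual = "datetime64[ns]"
    · subst a7; decide
    by_cases a8 : actual = "datetime64[ns, UTC]"
    · subst a8; decide
    by_cases a9 : actual = "object"
    · subst a9; decide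
    by_cases a10 : actual = "string"
    · subst a10; decide
    simp only [dtype_matches_py, dtype_matches_py_alt, pvLoopA, pvMappingA, pvGet, pvGroupOf, List.contains_eq_mem, List.mem_cons, List.not_mem_nil]
    simp [beq_iff_eq, a0, Ne.symm a0, a1, Ne.symm a1, a2, Ne.symm a2, a3, Ne.symm a3, a4, Ne.symm a4, a5, Ne.symm a5, a6, Ne.symm a6, a7, Ne.symm a7, a8, Ne.symm a8, a9, Ne.symm a9, a10, Ne.symm a10]
  by_cases e5 : expected = "float"
  · subst e5
    by_cases a0 : actual = "int64"
    · subst a0; decide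
    by_cases a1 : actual = "int32"
    · subst a1; decide
    by_cases a2 : actual = "int"
    · subst a2; decide
    by_cases a3 : actual = "float64"
    · subst a3; decide
    by_cases a4 : actual = "float32"
    · subst a4; decide
    by_cases a5 : actual = "float"
    · subst a5; decide
    by_cases a6 : actual = "datetime64"
    · subst a6; decide
    by_cases a7 : actual = "datetime64[ns]"
    · subst a7; decide
    by_cases a8 : actual = "datetime64[ns, UTC]"
    · subst a8; decide
    by_cases a9 : actual = "object"
    · subst a9; decide
    by_cases a10 : actual = "string"
    · subst a10; decide
    simp only [dtype_matches_py, dtype_matches_py_alt, pvLoopA, pvMappingA, pvGet, pvGroupOf, List.contains_eq_mem, List.mem_cons, List.not_mem_nil]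
    simp [beq_iff_eq, a0, Ne.symm a0, a1, Ne.symm a1, a2, Ne.symm a2, a3, Ne.symm a3, a4, Ne.symm a4, a5, Ne.symm a5, a6, Ne.symm a6, a7, Ne.symm a7, a8, Ne.symm a8, a9, Ne.symm a9, a10, Ne.symm a10]
  by_cases e6 : expected = "datetime64"
  · subst e6
    by_cases a0 : actual = "int64"
    · subst a0; decide
    by_cases a1 : actual = "int32"
    · subst a1; decide
    by_cases a2 : actual = "int"
    · subst a2; decide
    by_cases a3 : actual = "float64"
    · subst a3; decide
    by_cases a4 : actual = "float32"
    · subst a4; decide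
    by_cases a5 : actual = "float"
    · subst a5; decide
    by_cases a6 : actual = "datetime64"
    · subst a6; decide
    by_cases a7 : actual = "datetime64[ns]"
    · subst a7; decide
    by_cases a8 : actual = "datetime64[ns, UTC]"
    · subst a8; decide
    by_cases a9 : actual = "object"
    · subst a9; decide
    by_cases a10 : actual = "string"
    · subst a10; decide
    simp only [dtype_matches_py, dtype_matches_py_alt, pvLoopA, pvMappingA, pvGet, pvGroupOf, List.contains_eq_mem, List.mem_cons, List.not_mem_nil]
    simp [beq_iff_eq, a0, Ne.symm a0, a1, Ne.symm a1, a2, Ne.symm a2, a3, Ne.symm a3, a4, Ne.symm a4, a5, Ne.symm a5, a6, Ne.symm a6, a7, Ne.symm a7, a8, Ne.symm a8, a9, Ne.symm a9, a10, Ne.symm a10]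
  by_cases e7 : expected = "datetime64[ns]"
  · subst e7
    by_cases a0 : actual = "int64"
    · subst a0; decide
    by_cases a1 : actual = "int32"
    · subst a1; decide
    by_cases a2 : actual = "int"
    · subst a2; decide
    by_cases a3 : actual = "float64"
    · subst a3; decide
    by_cases a4 : actual = "float32"
    · subst a4; decide
    by_cases a5 : actual = "float"
    · subst a5; decide
    by_cases a6 : actual = "datetime64"
    · subst a6; decide
    by_cases a7 : actual = "datetime64[ns]"
    · subst a7; decide
    by_cases a8 : actual = "datetime64[ns, UTC]"
    · subst a8; decide
    by_cases a9 : actual = "object"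
    · subst a9; decide
    by_cases a10 : actual = "string"
    · subst a10; decide
    simp only [dtype_matches_py, dtype_matches_py_alt, pvLoopA, pvMappingA, pvGet, pvGroupOf, List.contains_eq_mem, List.mem_cons, List.not_mem_nil]
    simp [beq_iff_eq, a0, Ne.symm a0, a1, Ne.symm a1, a2, Ne.symm a2, a3, Ne.symm a3, a4, Ne.symm a4, a5, Ne.symm a5, a6, Ne.symm a6, a7, Ne.symm a7, a8, Ne.symm a8, a9, Ne.symm a9, a10, Ne.symm a10]
  by_cases e8 : expected = "datetime64[ns, UTC]"
  · subst e8
    by_cases a0 : actual = "int64"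
    · subst a0; decide
    by_cases a1 : actual = "int32"
    · subst a1; decide
    by_cases a2 : actual = "int"
    · subst a2; decide
    by_cases a3 : actual = "float64"
    · subst a3; decide
    by_cases a4 : actual = "float32"
    · subst a4; decide
    by_cases a5 : actual = "float"
    · subst a5; decide
    by_cases a6 : actual = "datetime64"
    · subst a6; decide
    by_cases a7 : actual = "datetime64[ns]"
    · subst a7; decide
    by_cases a8 : actual = "datetime64[ns, UTC]"
    · subst a8; decide
    by_cases a9 : actual = "object"
    · subst a9; decide
    by_cases a10 : actual = "string"
    · subst a10; decide
    simp only [dtype_matches_py, dtype_matches_py_alt, pvLoopA, pvMappingA, pvGet, pvGroupOf, List.contains_eq_mem, List.mem_cons, List.not_mem_nil]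
    simp [beq_iff_eq, a0, Ne.symm a0, a1, Ne.symm a1, a2, Ne.symm a2, a3, Ne.symm a3, a4, Ne.symm a4, a5, Ne.symm a5, a6, Ne.symm a6, a7, Ne.symm a7, a8, Ne.symm a8, a9, Ne.symm a9, a10, Ne.symm a10]
  by_cases e9 : expected = "object"
  · subst e9
    by_cases a0 : actual = "int64"
    · subst a0; decide
    by_cases a1 : actual = "int32"
    · subst a1; decide
    by_cases a2 : actual = "int"
    · subst a2; decide
    by_cases a3 : actual = "float64"
    · subst a3; decide
    by_cases a4 : actual = "float32"
    · subst a4; decide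
    by_cases a5 : actual = "float"
    · subst a5; decide
    by_cases a6 : actual = "datetime64"
    · subst a6; decide
    by_cases a7 : actual = "datetime64[ns]"
    · subst a7; decide
    by_cases a8 : actual = "datetime64[ns, UTC]"
    · subst a8; decide
    by_cases a9 : actual = "object"
    · subst a9; decide
    by_cases a10 : actual = "string"
    · subst a10; decide
    simp only [dtype_matches_py, dtype_matches_py_alt, pvLoopA, pvMappingA, pvGet, pvGroupOf, List.contains_eq_mem, List.mem_cons, List.not_mem_nil]
    simp [beq_iff_eq, a0, Ne.symm a0, a1, Ne.symm a1, a2, Ne.symm a2, a3, Ne.symm a3, a4, Ne.symm a4, a5, Ne.symm a5, a6, Ne.symm a6, a7, Ne.symm a7, a8, Ne.symm a8, a9, Ne.symm a9, a10, Ne.symm a10]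
  by_cases e10 : expected = "string"
  · subst e10
    by_cases a0 : actual = "int64"
    · subst a0; decide
    by_cases a1 : actual = "int32"
    · subst a1; decide
    by_cases a2 : actual = "int"
    · subst a2; decide
    by_cases a3 : actual = "float64"
    · subst a3; decide
    by_cases a4 : actual = "float32"
    · subst a4; decide
    by_cases a5 : actual = "float"
    · subst a5; decide
    by_cases a6 : actual = "datetime64"
    · subst a6; decide
    by_cases a7 : actual = "datetime64[ns]"
    · subst a7; decide
    by_cases a8 : actual = "datetime64[ns, UTC]"
    · subst a8; decide
    by_cases a9 : actual = "object"
    · subst a9; decide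
    by_cases a10 : actual = "string"
    · subst a10; decide
    simp only [dtype_matches_py, dtype_matches_py_alt, pvLoopA, pvMappingA, pvGet, pvGroupOf, List.contains_eq_mem, List.mem_cons, List.not_mem_nil]
    simp [beq_iff_eq, a0, Ne.symm a0, a1, Ne.symm a1, a2, Ne.symm a2, a3, Ne.symm a3, a4, Ne.symm a4, a5, Ne.symm a5, a6, Ne.symm a6, a7, Ne.symm a7, a8, Ne.symm a8, a9, Ne.symm a9, a10, Ne.symm a10]
  simp only [dtype_matches_py, dtype_matches_py_alt, pvLoopA, pvMappingA, pvGet, pvGroupOf, List.contains_eq_mem, List.mem_cons, List.not_mem_nil]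
  simp [beq_iff_eq, e0, Ne.symm e0, e1, Ne.symm e1, e2, Ne.symm e2, e3, Ne.symm e3, e4, Ne.symm e4, e5, Ne.symm e5, e6, Ne.symm e6, e7, Ne.symm e7, e8, Ne.symm e8, e9, Ne.symm e9, e10, Ne.symm e10]
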